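-- pv_equiv track=rewrite | github.com/MrChepe09/Competitive-Programming-Codes | Codechef July Cook-Off 2020/EVENTUAL.py | eventual
-- ===== SOURCE A (Python) =====
-- def eventual(n, s):
--     dicti = {}
--     for i in s:
--         if(i in dicti):
--             dicti[i] += 1
--         else:
--             dicti[i] = 1
--     for i in s:
--         if(dicti[i]%2==1):
--             return "NO"
--     return "YES"
-- ===== SOURCE B (Python) =====
-- def eventual(n, s):
--     odd = set()
--     for ch in s:
--         if ch in odd:
--             odd.remove(ch)
--         else:
--             odd.add(ch)
--     return "YES" if not odd else "NO"
-- ===== Notes on version B (the rewrite author's own statement) =====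
-- stated objective: simpler
-- what changed: Replaces the counting dict plus a second full scan with a single pass that toggles each character in/out of a set of odd-count characters and tests the set for emptiness.
import Mathlib
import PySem

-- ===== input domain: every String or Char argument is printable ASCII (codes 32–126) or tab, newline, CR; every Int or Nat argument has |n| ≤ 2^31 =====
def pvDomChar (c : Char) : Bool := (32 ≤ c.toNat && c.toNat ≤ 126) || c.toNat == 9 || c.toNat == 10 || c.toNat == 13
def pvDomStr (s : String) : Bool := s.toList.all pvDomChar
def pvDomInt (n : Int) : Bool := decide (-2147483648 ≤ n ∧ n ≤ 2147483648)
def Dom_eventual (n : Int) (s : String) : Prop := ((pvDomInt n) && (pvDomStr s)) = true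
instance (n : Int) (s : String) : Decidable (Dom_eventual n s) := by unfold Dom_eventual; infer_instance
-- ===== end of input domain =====

-- B replaces A's counting dict + second scan with one parity-toggling set pass (simpler, same O(n)).

-- ===== PORT A =====
-- first loop: build the character-count dict
def pvCountA (l : List Char) : PySem.Dict Char Int :=
  l.foldl (fun d c => if d.contains c then d.insert c (d.getD c 0 + 1) else d.insert c 1)
    PySem.Dict.empty

-- second loop: return "NO" at the first char with odd count ('dicti[i]' always present, so getD is exact)
def pvScanA (d : PySem.Dict Char Int) : List Char → String
  | [] => "YES"
  | c :: t => if PySem.Int.mod (d.getD c 0) 2 == 1 then "NO" else pvScanA d t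

def eventual (n : Int) (s : String) : String :=
  pvScanA (pvCountA s.toList) s.toList

-- ===== PORT B =====
-- 'odd.remove(ch)' runs only when ch ∈ odd, so the getD totalisation guard is never the result
def pvToggleB (t : PySem.Set Char) (l : List Char) : PySem.Set Char :=
  l.foldl (fun t c =>
    if PySem.Set.contains t c then (PySem.Set.remove? t c).getD t else PySem.Set.add t c) t

def eventual_alt (n : Int) (s : String) : String :=
  if pvToggleB PySem.Set.empty s.toList = [] then "YES" else "NO"

-- ===== PRECONDITION & SPEC =====
def Spec_eventual (n : Int) (s : String) (out : String) : Prop := out = eventual_alt n s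
instance (n : Int) (s : String) (out : String) : Decidable (Spec_eventual n s out) := by unfold Spec_eventual; infer_instance

-- ===== CLAIM (what is proved, stated in full; the proofs are below) =====
def Claim_equal_eventual : Prop := ∀ (n : Int) (s : String), Dom_eventual n s → Spec_eventual n s (eventual n s)

-- ===== LEMMAS AND PROOFS =====

-- A's first loop counts occurrences: the branch is the branchless counting insert
lemma pvCountA_getD (l : List Char) (c : Char) :
    (pvCountA l).getD c 0 = (l.count c : Int) := by
  have hstep : (fun (d : PySem.Dict Char Int) c => if d.contains c then d.insert c (d.getD c 0 + 1) else d.insert c 1)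
      = (fun (d : PySem.Dict Char Int) c => d.insert c (d.getD c 0 + 1)) := by
    funext d c
    by_cases h : d.contains c = true
    · simp [h]
    · simp only [Bool.not_eq_true] at h
      simp [h, PySem.Dict.getD_of_not_contains _ _ h]
  rw [pvCountA, hstep, PySem.Dict.getD_foldl_insert_add_one]
  simp [PySem.Dict.getD_empty]

lemma pvScanA_yes (d : PySem.Dict Char Int) (l : List Char)
    (h : ∀ c ∈ l, ¬ (PySem.Int.mod (d.getD c 0) 2 = 1)) : pvScanA d l = "YES" := by
  induction l with
  | nil => rfl
  | cons a t ih =>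
      have ha := h a (by simp)
      simp only [pvScanA, beq_iff_eq, if_neg ha]
      exact ih (fun c hc => h c (by simp [hc]))

lemma pvScanA_no (d : PySem.Dict Char Int) (l : List Char) (c : Char)
    (hc : c ∈ l) (hodd : PySem.Int.mod (d.getD c 0) 2 = 1) : pvScanA d l = "NO" := by
  induction l with
  | nil => cases hc
  | cons a t ih =>
      by_cases h : PySem.Int.mod (d.getD a 0) 2 = 1
      · simp only [pvScanA, beq_iff_eq, if_pos h]
      · simp only [pvScanA, beq_iff_eq, if_neg h]
        rcases List.mem_cons.mp hc with rfl | hct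
        · exact absurd hodd h
        · exact ih hct

-- B's toggle set holds exactly the characters of odd count (relative to the start set)
lemma mem_pvToggleB (l : List Char) :
    ∀ (t : PySem.Set Char), t.Nodup →
      (pvToggleB t l).Nodup ∧ ∀ c, (c ∈ pvToggleB t l ↔ (c ∈ t ↔ l.count c % 2 = 0)) := by
  induction l with
  | nil =>
      intro t ht
      refine ⟨ht, fun c => ?_⟩
      simp [pvToggleB]
  | cons a rest ih =>
      intro t ht
      have hstep : pvToggleB t (a :: rest)
          = pvToggleB (if a ∈ t then PySem.Set.discard t a else t ++ [a]) rest := by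
        by_cases h : a ∈ t
        · simp [pvToggleB, h, PySem.Set.remove?_of_mem h]
        · simp [pvToggleB, h]
      by_cases h : a ∈ t
      · have ht' : (PySem.Set.discard t a).Nodup := PySem.Set.nodup_discard t a ht
        obtain ⟨hn, hm⟩ := ih (PySem.Set.discard t a) ht'
        rw [hstep, if_pos h]
        refine ⟨hn, fun c => ?_⟩
        rw [hm c, PySem.Set.mem_discard]
        by_cases hca : c = a
        · subst hca
          simp [h]
          omega
        · have hac : a ≠ c := fun hh => hca hh.symm
          simp [hca, hac]
      · have ht' : (t ++ [a]).Nodup :=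
          ht.append (List.nodup_singleton a) (by simp [List.disjoint_singleton, h])
        obtain ⟨hn, hm⟩ := ih (t ++ [a]) ht'
        rw [hstep, if_neg h]
        refine ⟨hn, fun c => ?_⟩
        rw [hm c]
        by_cases hca : c = a
        · subst hca
          simp [h]
          omega
        · have hac : a ≠ c := fun hh => hca hh.symm
          simp [hca, hac]

lemma mem_pvToggleB_empty (l : List Char) (c : Char) :
    c ∈ pvToggleB PySem.Set.empty l ↔ l.count c % 2 = 1 := by
  have := (mem_pvToggleB l PySem.Set.empty (by simp [PySem.Set.empty])).2 c
  rw [this]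
  simp [PySem.Set.empty]

lemma mod_count_eq_one_iff (l : List Char) (c : Char) :
    PySem.Int.mod ((pvCountA l).getD c 0) 2 = 1 ↔ l.count c % 2 = 1 := by
  rw [pvCountA_getD]
  rw [show ((2 : Int)) = ((2 : Nat) : Int) by norm_num, PySem.Int.mod_natCast]
  constructor
  · intro h; exact_mod_cast h
  · intro h; exact_mod_cast congrArg (fun m : Nat => (m : Int)) h

-- ===== VERDICT (by name: the statement is the Claim_ definition above) =====
theorem eventual_spec : Claim_equal_eventual := by
  intro n s _
  unfold Spec_eventual eventual eventual_alt
  by_cases hE : pvToggleB PySem.Set.empty s.toList = []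
  · rw [if_pos hE]
    apply pvScanA_yes
    intro c hc hmod
    have hodd : s.toList.count c % 2 = 1 := (mod_count_eq_one_iff _ _).mp hmod
    have : c ∈ pvToggleB PySem.Set.empty s.toList := (mem_pvToggleB_empty _ _).mpr hodd
    rw [hE] at this
    cases this
  · rw [if_neg hE]
    obtain ⟨c, hc⟩ := List.exists_mem_of_ne_nil _ hE
    have hodd : s.toList.count c % 2 = 1 := (mem_pvToggleB_empty _ _).mp hc
    have hmem : c ∈ s.toList := by
      by_contra hn
      rw [List.count_eq_zero_of_not_mem hn] at hodd
      omega
    exact pvScanA_no _ _ c hmem ((mod_count_eq_one_iff _ _).mpr hodd)
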